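-- pv_equiv track=rewrite | github.com/Aryudesu/myLibrary | math/magicSquare.py | _make4Time
-- ===== SOURCE A (Python) =====
-- def _make4Time(num: int):
--     result = [[0] * num for _ in range(num)]
--     y, x = 0, 0
--     for i in range(1, num * num + 1):
--         if ((y % 4) * 4 + (x % 4)) % 5 == 0 or ((y % 4) * 4 + (x % 4)) % 3 == 0:
--             result[y][x] = i
--         x += 1
--         if x == num:
--             x = 0
--             y += 1
--     y, x = num - 1, num - 1
--     for i in range(1, num * num + 1):
--         if result[y][x] == 0:
--             result[y][x] = i
--         x -= 1
--         if x == -1: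
--             x = num - 1
--             y -= 1
--     return result
-- ===== SOURCE B (Python) =====
-- def _make4Time(num: int):
--     # One closed-form pass: each cell (y, x) holds v = y*num + x + 1 if it is on
--     # the 4x4 diagonal pattern, and the complement num*num + 1 - v otherwise.
--     n2 = num * num
--     result = []
--     for y in range(num):
--         row = []
--         for x in range(num):
--             v = y * num + x + 1
--             if ((y % 4) * 4 + (x % 4)) % 5 == 0 or ((y % 4) * 4 + (x % 4)) % 3 == 0:
--                 row.append(v)
--             else:
--                 row.append(n2 + 1 - v)
--         result.append(row)
--     return result
-- ===== Notes on version B (the rewrite author's own statement) =====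
-- stated objective: simpler
-- what changed: B computes each cell directly in one closed-form pass (v on the 4x4 diagonal pattern, complement num*num+1-v elsewhere), replacing A's two counter-driven sweeps over a mutable grid.
import Mathlib
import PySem

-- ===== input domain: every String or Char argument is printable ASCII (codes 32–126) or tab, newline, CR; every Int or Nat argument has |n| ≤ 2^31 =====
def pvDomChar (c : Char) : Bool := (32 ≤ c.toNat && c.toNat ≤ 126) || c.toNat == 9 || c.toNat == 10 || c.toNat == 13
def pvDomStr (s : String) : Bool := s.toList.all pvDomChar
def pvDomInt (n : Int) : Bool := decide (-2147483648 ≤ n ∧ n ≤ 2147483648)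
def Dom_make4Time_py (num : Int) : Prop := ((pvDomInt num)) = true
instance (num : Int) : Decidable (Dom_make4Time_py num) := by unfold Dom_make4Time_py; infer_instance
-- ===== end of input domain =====

-- B replaces A's two counter-driven sweeps over a mutable grid by one closed-form
-- pass that writes each cell directly (objective: simpler).

-- ===== PORT A =====
-- the pattern test appearing verbatim in both Python sources:
-- ((y % 4) * 4 + (x % 4)) % 5 == 0 or ((y % 4) * 4 + (x % 4)) % 3 == 0
def pvPat (y x : Int) : Bool :=
  decide (PySem.Int.mod ((PySem.Int.mod y 4) * 4 + PySem.Int.mod x 4) 5 = 0) ||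
  decide (PySem.Int.mod ((PySem.Int.mod y 4) * 4 + PySem.Int.mod x 4) 3 = 0)

-- first loop body of A; result[y][x] = i modelled with pySetD/pyGetD
-- (out-of-range = Python's IndexError; reachable only for num < 0, excluded by Pre_)
def pvStep1 (num : Int) (st : List (List Int) × Int × Int) (i : Int) :
    List (List Int) × Int × Int :=
  let res := st.1; let y := st.2.1; let x := st.2.2
  let res := if pvPat y x then
      PySem.List.pySetD res y (PySem.List.pySetD (PySem.List.pyGetD res y []) x i)
    else res
  let x := x + 1
  if x = num then (res, y + 1, 0) else (res, y, x)

-- second loop body of A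
def pvStep2 (num : Int) (st : List (List Int) × Int × Int) (i : Int) :
    List (List Int) × Int × Int :=
  let res := st.1; let y := st.2.1; let x := st.2.2
  let res := if PySem.List.pyGetD (PySem.List.pyGetD res y []) x 0 = 0 then
      PySem.List.pySetD res y (PySem.List.pySetD (PySem.List.pyGetD res y []) x i)
    else res
  let x := x - 1
  if x = -1 then (res, y - 1, num - 1) else (res, y, x)

def make4Time_py (num : Int) : List (List Int) :=
  -- [[0] * num for _ in range(num)]  ([0]*num is empty for num ≤ 0, like toNat)
  let result := (PySem.List.pyRange 0 num 1).map (fun _ => List.replicate num.toNat (0 : Int))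
  let s1 := (PySem.List.pyRange 1 (num * num + 1) 1).foldl (pvStep1 num) (result, 0, 0)
  let s2 := (PySem.List.pyRange 1 (num * num + 1) 1).foldl (pvStep2 num) (s1.1, num - 1, num - 1)
  s2.1

-- ===== PORT B =====
def make4Time_py_alt (num : Int) : List (List Int) :=
  let n2 := num * num
  (PySem.List.pyRange 0 num 1).map (fun y =>
    (PySem.List.pyRange 0 num 1).map (fun x =>
      let v := y * num + x + 1
      if pvPat y x then v else n2 + 1 - v))

-- ===== PRECONDITION & SPEC =====
-- A raises IndexError for num < 0 (its first assignment hits the empty grid)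
def Pre_make4Time_py (num : Int) : Prop := 0 ≤ num
instance (num : Int) : Decidable (Pre_make4Time_py num) := by unfold Pre_make4Time_py; infer_instance
def pvWitness_make4Time_py : Int := 4

def Spec_make4Time_py (num : Int) (out : List (List Int)) : Prop := out = make4Time_py_alt num
instance (num : Int) (out : List (List Int)) : Decidable (Spec_make4Time_py num out) := by unfold Spec_make4Time_py; infer_instance

-- ===== CLAIM (what is proved, stated in full; the proofs are below) =====
def Claim_equal_make4Time_py : Prop := ∀ (num : Int), Dom_make4Time_py num → Pre_make4Time_py num → Spec_make4Time_py num (make4Time_py num)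

-- ===== LEMMAS AND PROOFS =====

-- abstract grid: n×n matrix given by a cell function
def pvGrid (n : Nat) (f : Nat → Nat → Int) : List (List Int) :=
  (List.range n).map (fun y => (List.range n).map (fun x => f y x))

-- cell contents after k steps of pass 1: cells with linear index < k filled per pattern
def pvF1 (n k : Nat) (y x : Nat) : Int :=
  if y * n + x < k ∧ pvPat y x then ((y * n + x + 1 : Nat) : Int) else 0

-- cell contents after k steps of pass 2
def pvF2 (n k : Nat) (y x : Nat) : Int :=
  if pvPat y x then ((y * n + x + 1 : Nat) : Int)
  else if n * n ≤ y * n + x + k then ((n * n + 1 : Nat) : Int) - ((y * n + x + 1 : Nat) : Int)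
  else 0

theorem pvGrid_congr {n : Nat} {f g : Nat → Nat → Int}
    (h : ∀ y < n, ∀ x < n, f y x = g y x) : pvGrid n f = pvGrid n g := by
  unfold pvGrid
  refine List.map_congr_left (fun y hy => ?_)
  refine List.map_congr_left (fun x hx => ?_)
  exact h y (List.mem_range.1 hy) x (List.mem_range.1 hx)

theorem pvGrid_row {n : Nat} {f : Nat → Nat → Int} {y : Nat} (hy : y < n) :
    PySem.List.pyGetD (pvGrid n f) ((y : Int)) [] = (List.range n).map (fun x => f y x) := by
  rw [PySem.List.pyGetD_natCast]
  simp [pvGrid, List.getD, hy]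

theorem pvGrid_read {n : Nat} {f : Nat → Nat → Int} {y x : Nat} (hy : y < n) (hx : x < n) :
    PySem.List.pyGetD (PySem.List.pyGetD (pvGrid n f) ((y : Int)) []) ((x : Int)) 0 = f y x := by
  rw [pvGrid_row hy, PySem.List.pyGetD_natCast]
  simp [List.getD, hx]

theorem pvGrid_set {n : Nat} {f : Nat → Nat → Int} {y x : Nat} (hy : y < n) (hx : x < n) (v : Int) :
    PySem.List.pySetD (pvGrid n f) ((y : Int))
      (PySem.List.pySetD (PySem.List.pyGetD (pvGrid n f) ((y : Int)) []) ((x : Int)) v)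
    = pvGrid n (fun y' x' => if y' = y ∧ x' = x then v else f y' x') := by
  rw [pvGrid_row hy, PySem.List.pySetD_natCast, PySem.List.pySetD_natCast]
  unfold pvGrid
  apply List.ext_getElem
  · simp
  · intro i h1 h2
    simp only [List.length_set, List.length_map, List.length_range] at h1 h2
    simp only [List.getElem_set, List.getElem_map, List.getElem_range]
    by_cases hiy : y = i
    · subst hiy
      rw [if_pos rfl]
      apply List.ext_getElem
      · simp
      · intro j h3 h4
        simp only [List.getElem_set, List.getElem_map, List.getElem_range]
        by_cases hjx : x = j
        · subst hjx; rw [if_pos rfl, if_pos (by simp)]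
        · rw [if_neg hjx, if_neg (by tauto)]
    · rw [if_neg hiy]
      apply List.map_congr_left
      intro j hj
      rw [if_neg (by tauto)]

-- injectivity of the linear index
theorem pvLin_inj {n y x y' x' : Nat} (hx : x < n) (hx' : x' < n)
    (h : y * n + x = y' * n + x') : y = y' ∧ x = x' := by
  rcases Nat.lt_trichotomy y y' with h1 | h1 | h1
  · exfalso
    have := Nat.mul_le_mul_right n (Nat.succ_le_of_lt h1)
    simp [Nat.succ_mul] at this
    omega
  · constructor
    · exact h1
    · subst h1; omega
  · exfalso
    have := Nat.mul_le_mul_right n (Nat.succ_le_of_lt h1)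
    simp [Nat.succ_mul] at this
    omega

theorem pvLin_lt {n y x : Nat} (hy : y < n) (hx : x < n) : y * n + x < n * n := by
  have := Nat.mul_le_mul_right n (Nat.succ_le_of_lt hy)
  simp [Nat.succ_mul] at this
  omega

theorem pvY_lt {n y x : Nat} (hx : x < n) (h : y * n + x < n * n) : y < n := by
  by_contra hc
  have := Nat.mul_le_mul_right n (Nat.le_of_not_lt hc)
  omega

-- pass 1 invariant
theorem pvPass1 (n : Nat) : ∀ (m y x : Nat), x < n → y * n + x + m = n * n →
    ((PySem.List.pyRange (((y * n + x : Nat) : Int) + 1) (((n * n : Nat) : Int) + 1) 1).foldl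
      (pvStep1 (n : Int)) (pvGrid n (pvF1 n (y * n + x)), ((y : Nat) : Int), ((x : Nat) : Int))).1
    = pvGrid n (pvF1 n (n * n)) := by
  intro m
  induction m with
  | zero =>
    intro y x hx hm
    rw [PySem.List.pyRange_one_eq_nil (by omega)]
    simp only [List.foldl_nil]
    rw [show y * n + x = n * n by omega]
  | succ m ih =>
    intro y x hx hm
    have hk : y * n + x < n * n := by omega
    have hy : y < n := pvY_lt hx hk
    rw [PySem.List.pyRange_one_cons (by exact_mod_cast Nat.add_lt_add_right hk 1)]
    rw [List.foldl_cons]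
    simp only [pvStep1]
    have hgrid : (if pvPat ((y : Nat) : Int) ((x : Nat) : Int) then
        PySem.List.pySetD (pvGrid n (pvF1 n (y * n + x))) ((y : Nat) : Int)
          (PySem.List.pySetD
            (PySem.List.pyGetD (pvGrid n (pvF1 n (y * n + x))) ((y : Nat) : Int) [])
            ((x : Nat) : Int) (((y * n + x : Nat) : Int) + 1))
      else pvGrid n (pvF1 n (y * n + x))) = pvGrid n (pvF1 n (y * n + x + 1)) := by
      by_cases hp : pvPat ((y : Nat) : Int) ((x : Nat) : Int)
      · rw [if_pos hp, pvGrid_set hy hx]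
        apply pvGrid_congr
        intro y' hy' x' hx'
        by_cases he : y' = y ∧ x' = x
        · obtain ⟨rfl, rfl⟩ := he
          rw [if_pos ⟨rfl, rfl⟩]
          unfold pvF1
          rw [if_pos ⟨by omega, hp⟩]
          push_cast; ring
        · rw [if_neg he]
          unfold pvF1
          have hne : y' * n + x' ≠ y * n + x := fun h => he (pvLin_inj hx' hx h)
          have hiff : (y' * n + x' < y * n + x ∧ pvPat ((y' : Nat) : Int) ((x' : Nat) : Int))
              ↔ (y' * n + x' < y * n + x + 1 ∧ pvPat ((y' : Nat) : Int) ((x' : Nat) : Int)) := by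
            constructor <;> rintro ⟨h1, h2⟩ <;> exact ⟨by omega, h2⟩
          rw [if_congr hiff rfl rfl]
      · rw [if_neg hp]
        apply pvGrid_congr
        intro y' hy' x' hx'
        unfold pvF1
        have hiff : (y' * n + x' < y * n + x ∧ pvPat ((y' : Nat) : Int) ((x' : Nat) : Int))
            ↔ (y' * n + x' < y * n + x + 1 ∧ pvPat ((y' : Nat) : Int) ((x' : Nat) : Int)) := by
          constructor <;> rintro ⟨h1, h2⟩ <;> refine ⟨?_, h2⟩
          · omega
          · rcases Nat.lt_or_ge (y' * n + x') (y * n + x) with h | h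
            · exact h
            · exfalso
              have hEq : y' * n + x' = y * n + x := by omega
              obtain ⟨h3, h4⟩ := pvLin_inj hx' hx hEq
              subst h3; subst h4
              exact hp h2
        rw [if_congr hiff rfl rfl]
    rw [hgrid]
    by_cases hxn : x + 1 = n
    · rw [if_pos (show ((x : Nat) : Int) + 1 = ((n : Nat) : Int) by exact_mod_cast hxn)]
      have e : (y + 1) * n + 0 = y * n + x + 1 := by rw [Nat.succ_mul]; omega
      have h2 := ih (y + 1) 0 (by omega) (by rw [e]; omega)
      rw [e] at h2
      push_cast at h2 ⊢
      convert h2 using 3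
    · rw [if_neg (show ¬ ((x : Nat) : Int) + 1 = ((n : Nat) : Int) from
        fun h => hxn (by exact_mod_cast h))]
      have e : y * n + (x + 1) = y * n + x + 1 := by omega
      have h2 := ih y (x + 1) (by omega) (by rw [e]; omega)
      rw [e] at h2
      push_cast at h2 ⊢
      convert h2 using 3

-- one step of pass 2 on the grid part
theorem pvStep2_grid (n y x : Nat) (hy : y < n) (hx : x < n) :
    (if PySem.List.pyGetD (PySem.List.pyGetD (pvGrid n (pvF2 n (n * n - (y * n + x) - 1))) ((y : Nat) : Int) []) ((x : Nat) : Int) 0 = 0 then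
       PySem.List.pySetD (pvGrid n (pvF2 n (n * n - (y * n + x) - 1))) ((y : Nat) : Int)
         (PySem.List.pySetD (PySem.List.pyGetD (pvGrid n (pvF2 n (n * n - (y * n + x) - 1))) ((y : Nat) : Int) []) ((x : Nat) : Int) ((n * n - (y * n + x) : Nat) : Int))
     else pvGrid n (pvF2 n (n * n - (y * n + x) - 1)))
    = pvGrid n (pvF2 n (n * n - (y * n + x))) := by
  have hm := pvLin_lt hy hx
  have hval : pvF2 n (n * n - (y * n + x) - 1) y x
      = if pvPat ((y : Nat) : Int) ((x : Nat) : Int) then ((y * n + x + 1 : Nat) : Int) else 0 := by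
    unfold pvF2
    by_cases hp : pvPat ((y : Nat) : Int) ((x : Nat) : Int)
    · rw [if_pos hp, if_pos hp]
    · rw [if_neg hp, if_neg hp, if_neg (by omega)]
  rw [pvGrid_read hy hx, hval]
  by_cases hp : pvPat ((y : Nat) : Int) ((x : Nat) : Int)
  · rw [if_pos hp, if_neg (by omega)]
    apply pvGrid_congr
    intro y' hy' x' hx'
    unfold pvF2
    by_cases hp' : pvPat ((y' : Nat) : Int) ((x' : Nat) : Int)
    · rw [if_pos hp', if_pos hp']
    · have hne : y' * n + x' ≠ y * n + x := by
        intro h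
        obtain ⟨h1, h2⟩ := pvLin_inj hx' hx h
        subst h1; subst h2
        exact hp' hp
      have hiff : (n * n ≤ y' * n + x' + (n * n - (y * n + x) - 1))
          ↔ (n * n ≤ y' * n + x' + (n * n - (y * n + x))) := by omega
      rw [if_neg hp', if_neg hp', if_congr hiff rfl rfl]
  · rw [if_neg hp, if_pos rfl, pvGrid_set hy hx]
    apply pvGrid_congr
    intro y' hy' x' hx'
    by_cases he : y' = y ∧ x' = x
    · obtain ⟨rfl, rfl⟩ := he
      rw [if_pos ⟨rfl, rfl⟩]
      unfold pvF2
      rw [if_neg hp, if_pos (by omega)]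
      omega
    · rw [if_neg he]
      unfold pvF2
      have hne : y' * n + x' ≠ y * n + x := fun h => he (pvLin_inj hx' hx h)
      by_cases hp' : pvPat ((y' : Nat) : Int) ((x' : Nat) : Int)
      · rw [if_pos hp', if_pos hp']
      · have hiff : (n * n ≤ y' * n + x' + (n * n - (y * n + x) - 1))
            ↔ (n * n ≤ y' * n + x' + (n * n - (y * n + x))) := by omega
        rw [if_neg hp', if_neg hp', if_congr hiff rfl rfl]

-- pass 2 invariant
theorem pvPass2 (n : Nat) : ∀ (m y x : Nat), x < n → y < n → y * n + x = m →
    ((PySem.List.pyRange ((n * n - m : Nat) : Int) (((n * n : Nat) : Int) + 1) 1).foldl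
      (pvStep2 (n : Int)) (pvGrid n (pvF2 n (n * n - m - 1)), ((y : Nat) : Int), ((x : Nat) : Int))).1
    = pvGrid n (pvF2 n (n * n)) := by
  intro m
  induction m with
  | zero =>
    intro y x hx hy hlin
    have hx0 : x = 0 := by omega
    have hy0 : y = 0 := by
      rcases Nat.mul_eq_zero.1 (by omega : y * n = 0) with h | h
      · exact h
      · omega
    subst hx0; subst hy0
    rw [show n * n - 0 = n * n from rfl, PySem.List.pyRange_one_singleton]
    rw [List.foldl_cons]
    simp only [pvStep2, List.foldl_nil]
    have hg := pvStep2_grid n 0 0 hy hx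
    simp only [Nat.zero_mul, Nat.add_zero, Nat.sub_zero] at hg
    rw [hg]
    rw [if_pos (by norm_num)]
  | succ m ih =>
    intro y x hx hy hlin
    have hm1 : m + 1 < n * n := hlin ▸ pvLin_lt hy hx
    rw [PySem.List.pyRange_one_cons (by omega)]
    rw [List.foldl_cons]
    simp only [pvStep2]
    have hg := pvStep2_grid n y x hy hx
    rw [hlin] at hg
    rw [hg]
    by_cases hx0 : x = 0
    · subst hx0
      rw [if_pos (by omega)]
      have hy1 : y ≠ 0 := by rintro rfl; rw [Nat.zero_mul] at hlin; omega
      obtain ⟨z, rfl⟩ : ∃ z, y = z + 1 := ⟨y - 1, by omega⟩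
      have hzn : z * n + n = m + 1 := by rw [← Nat.succ_mul]; omega
      have h2 := ih z (n - 1) (by omega) (by omega) (by omega)
      rw [show n * n - m - 1 = n * n - (m + 1) from by omega] at h2
      rw [show ((n * n - m : Nat) : Int) = ((n * n - (m + 1) : Nat) : Int) + 1 from by omega] at h2
      rw [show ((z : Nat) : Int) = ((z + 1 : Nat) : Int) - 1 from by push_cast; ring] at h2
      rw [show ((n - 1 : Nat) : Int) = ((n : Nat) : Int) - 1 from by omega] at h2
      exact h2
    · rw [if_neg (by omega)]
      have h2 := ih y (x - 1) (by omega) hy (by omega)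
      rw [show n * n - m - 1 = n * n - (m + 1) from by omega] at h2
      rw [show ((n * n - m : Nat) : Int) = ((n * n - (m + 1) : Nat) : Int) + 1 from by omega] at h2
      rw [show ((x - 1 : Nat) : Int) = ((x : Nat) : Int) - 1 from by omega] at h2
      exact h2

theorem pvLast (n : Nat) (hn : 0 < n) : (n - 1) * n + (n - 1) + 1 = n * n := by
  obtain ⟨k, rfl⟩ : ∃ k, n = k + 1 := ⟨n - 1, by omega⟩
  simp only [Nat.add_sub_cancel]
  ring

-- ===== VERDICT (by name: the statement is the Claim_ definition above) =====
theorem make4Time_py_spec : Claim_equal_make4Time_py := by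
  unfold Claim_equal_make4Time_py
  intro num _ hpre
  unfold Spec_make4Time_py
  unfold Pre_make4Time_py at hpre
  obtain ⟨n, rfl⟩ : ∃ n : Nat, num = (n : Int) := ⟨num.toNat, (Int.toNat_of_nonneg hpre).symm⟩
  rcases Nat.eq_zero_or_pos n with rfl | hn
  · decide
  · simp only [make4Time_py]
    have hinit : (PySem.List.pyRange 0 (n : Int) 1).map
        (fun _ => List.replicate ((n : Int)).toNat (0 : Int)) = pvGrid n (pvF1 n 0) := by
      rw [PySem.List.pyRange_zero_nat, List.map_map]
      unfold pvGrid
      apply List.map_congr_left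
      intro y _
      simp [pvF1, List.map_const']
    rw [hinit]
    have h1 := pvPass1 n (n * n) 0 0 hn (by simp)
    push_cast at h1
    norm_num at h1
    rw [h1]
    have e0 := pvLast n hn
    have h2 := pvPass2 n ((n - 1) * n + (n - 1)) (n - 1) (n - 1) (by omega) (by omega) rfl
    rw [show n * n - ((n - 1) * n + (n - 1)) - 1 = 0 from by omega] at h2
    rw [show ((n * n - ((n - 1) * n + (n - 1)) : Nat) : Int) = 1 from by omega] at h2
    rw [show ((n - 1 : Nat) : Int) = (n : Int) - 1 from by omega] at h2
    rw [show ((n * n : Nat) : Int) = (n : Int) * (n : Int) from by push_cast; ring] at h2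
    have hF : pvGrid n (pvF1 n (n * n)) = pvGrid n (pvF2 n 0) := by
      apply pvGrid_congr
      intro y hy x hx
      have hlt := pvLin_lt hy hx
      unfold pvF1 pvF2
      by_cases hp : pvPat ((y : Nat) : Int) ((x : Nat) : Int)
      · rw [if_pos ⟨hlt, hp⟩, if_pos hp]
      · rw [if_neg (by tauto), if_neg hp, if_neg (by omega)]
    rw [hF, h2]
    simp only [make4Time_py_alt]
    rw [PySem.List.pyRange_zero_nat, List.map_map]
    unfold pvGrid
    apply List.map_congr_left
    intro y hy
    simp only [Function.comp_apply]
    rw [List.map_map]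
    apply List.map_congr_left
    intro x hx
    simp only [Function.comp_apply]
    have hlt := pvLin_lt (List.mem_range.1 hy) (List.mem_range.1 hx)
    unfold pvF2
    by_cases hp : pvPat ((y : Nat) : Int) ((x : Nat) : Int)
    · rw [if_pos hp, if_pos hp]
      push_cast; ring
    · rw [if_neg hp, if_pos (by omega), if_neg hp]
      push_cast; ring
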